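-- pv_equiv track=rewrite | github.com/shark555/websnake_demo | library/websnake/http_request_parser.py | parse_path_as_dictionary
-- ===== SOURCE A (Python) =====
-- def parse_path_as_dictionary(path_info: str, start: int=0) -> dict:
--     names = path_info.split('/')
--     non_empty_names = []
--     for name in names:
--         if name:
--             non_empty_names.append(name)
--     result = {}
--     for key, name in enumerate(non_empty_names):
--         if key >= start:
--             if key == len(non_empty_names) - 1:
--                 value = ""
--             else:
--                 value = non_empty_names[key + 1]
--             if key % 2 == 0:
--                 result[name] = value
--
--     return result
-- ===== SOURCE B (Python) =====
-- def parse_path_as_dictionary(path_info: str, start: int = 0) -> dict: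
--     names = [n for n in path_info.split('/') if n]
--     result = {}
--     i = max(start, 0)
--     if i % 2:
--         i += 1
--     while i < len(names):
--         result[names[i]] = names[i + 1] if i + 1 < len(names) else ""
--         i += 2
--     return result
-- ===== Notes on version B (the rewrite author's own statement) =====
-- stated objective: simpler
-- what changed: A enumerates every filtered segment, testing each index against start and for evenness; B computes the first even index at or above max(start,0) once and walks a while-loop stepping by 2, pairing each key with its successor (or the empty string at the end).
import Mathlib
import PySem

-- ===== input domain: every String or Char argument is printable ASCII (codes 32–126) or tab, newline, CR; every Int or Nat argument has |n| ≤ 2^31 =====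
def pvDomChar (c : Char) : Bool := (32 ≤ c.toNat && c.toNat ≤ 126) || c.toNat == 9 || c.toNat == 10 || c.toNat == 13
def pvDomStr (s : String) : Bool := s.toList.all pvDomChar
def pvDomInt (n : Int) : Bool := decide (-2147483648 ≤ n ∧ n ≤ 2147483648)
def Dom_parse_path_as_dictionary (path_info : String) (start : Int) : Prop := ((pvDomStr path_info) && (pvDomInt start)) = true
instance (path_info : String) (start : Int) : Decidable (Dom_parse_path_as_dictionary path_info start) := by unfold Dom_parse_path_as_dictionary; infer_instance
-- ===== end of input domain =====

-- B replaces A's enumerate-every-index loop (parity and >=start tests per element) by a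
-- while-loop that jumps directly to the first even index >= max(start,0) and steps by 2;
-- objective: simpler/alternative decomposition, same asymptotic cost.


-- ===== PORT A =====
def parse_path_as_dictionary (path_info : String) (start : Int) : List (String × String) :=
  let names := (PySem.Str.split? path_info "/").getD []
  let non_empty_names := names.foldl (fun acc name => if name ≠ "" then acc ++ [name] else acc) []
  let result := (PySem.List.enumerate non_empty_names 0).foldl (fun r p =>
      if p.1 ≥ start then
        let value := if p.1 = (non_empty_names.length : Int) - 1 then ""
                     else PySem.List.pyGetD non_empty_names (p.1 + 1) ""
        if PySem.Int.mod p.1 2 = 0 then r.insert p.2 value else r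
      else r) PySem.Dict.empty
  result.items

-- ===== PORT B =====
-- the while loop of Source B (index steps by 2 until past the end)
def pvBLoop (names : List String) (i : Nat) (d : PySem.Dict String String) :
    PySem.Dict String String :=
  if i < names.length then
    pvBLoop names (i + 2)
      (d.insert (names.getD i "") (if i + 1 < names.length then names.getD (i + 1) "" else ""))
  else d
termination_by names.length - i

def parse_path_as_dictionary_alt (path_info : String) (start : Int) : List (String × String) :=
  let names := ((PySem.Str.split? path_info "/").getD []).filter (fun n => n ≠ "")
  let i1 : Int := max start 0
  let i0 : Int := if PySem.Int.mod i1 2 ≠ 0 then i1 + 1 else i1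
  (pvBLoop names i0.toNat PySem.Dict.empty).items

-- ===== PRECONDITION & SPEC =====
def Spec_parse_path_as_dictionary (path_info : String) (start : Int) (out : List (String × String)) : Prop := out = parse_path_as_dictionary_alt path_info start
instance (path_info : String) (start : Int) (out : List (String × String)) : Decidable (Spec_parse_path_as_dictionary path_info start out) := by unfold Spec_parse_path_as_dictionary; infer_instance

-- ===== CLAIM (what is proved, stated in full; the proofs are below) =====
def Claim_equal_parse_path_as_dictionary : Prop := ∀ (path_info : String) (start : Int), Dom_parse_path_as_dictionary path_info start → Spec_parse_path_as_dictionary path_info start (parse_path_as_dictionary path_info start)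

-- ===== LEMMAS AND PROOFS =====

-- A's loop body, with the names list and start fixed
def pvF (ns : List String) (start : Int) (r : PySem.Dict String String) (p : Int × String) :
    PySem.Dict String String :=
  if p.1 ≥ start then
    let value := if p.1 = (ns.length : Int) - 1 then "" else PySem.List.pyGetD ns (p.1 + 1) ""
    if PySem.Int.mod p.1 2 = 0 then r.insert p.2 value else r
  else r

-- A's loop restricted to the suffix from index i
def pvAFrom (ns : List String) (start : Int) (i : Nat) (d : PySem.Dict String String) :
    PySem.Dict String String :=
  (PySem.List.enumerate (ns.drop i) i).foldl (pvF ns start) d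

lemma pvAFrom_stop (ns : List String) (start : Int) (i : Nat) (h : ns.length ≤ i) (d) :
    pvAFrom ns start i d = d := by
  simp [pvAFrom, List.drop_of_length_le h]

lemma pvAFrom_step (ns : List String) (start : Int) (i : Nat) (h : i < ns.length) (d) :
    pvAFrom ns start i d = pvAFrom ns start (i + 1) (pvF ns start d (i, ns[i])) := by
  unfold pvAFrom
  rw [List.drop_eq_getElem_cons h, PySem.List.enumerate_cons]
  push_cast
  rfl

lemma pvF_even (ns : List String) (start : Int) (i : Nat) (h : i < ns.length)
    (he : i % 2 = 0) (hs : (i : Int) ≥ start) (d) :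
    pvF ns start d (i, ns[i]) =
      d.insert ns[i] (if i + 1 < ns.length then ns.getD (i + 1) "" else "") := by
  have h2 : PySem.Int.mod (i : Int) 2 = 0 := by
    rw [PySem.Int.mod_eq_emod_of_pos (by omega)]; omega
  have hval : (if (i : Int) = (ns.length : Int) - 1 then ""
      else PySem.List.pyGetD ns ((i : Int) + 1) "") =
      (if i + 1 < ns.length then ns.getD (i + 1) "" else "") := by
    by_cases hlast : i + 1 < ns.length
    · rw [if_neg (by omega), if_pos hlast]
      have : ((i : Int) + 1) = ((i + 1 : Nat) : Int) := by push_cast; ring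
      rw [this, PySem.List.pyGetD_natCast]
    · rw [if_pos (by omega), if_neg hlast]
  simp only [pvF, if_pos hs, h2, hval]
  simp

lemma pvF_skip (ns : List String) (start : Int) (i : Nat)
    (hc : (i : Int) < start ∨ i % 2 = 1) (d) (x : String) :
    pvF ns start d (i, x) = d := by
  unfold pvF
  rcases hc with hlt | hodd
  · rw [if_neg (by omega)]
  · by_cases hs : (i : Int) ≥ start
    · have h2 : PySem.Int.mod (i : Int) 2 ≠ 0 := by
        rw [PySem.Int.mod_eq_emod_of_pos (by omega)]; omega
      simp only [if_pos hs, if_neg h2]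
    · rw [if_neg hs]

lemma pvAFrom_eq_bLoop (ns : List String) (start : Int) :
    ∀ (m i : Nat) (d : PySem.Dict String String), ns.length - i ≤ m → i % 2 = 0 →
      (i : Int) ≥ start → pvAFrom ns start i d = pvBLoop ns i d := by
  intro m
  induction m with
  | zero =>
    intro i d hm _ _
    rw [pvAFrom_stop ns start i (by omega), pvBLoop, if_neg (by omega)]
  | succ m ih =>
    intro i d hm he hs
    by_cases h : i < ns.length
    · rw [pvAFrom_step ns start i h, pvF_even ns start i h he hs]
      set d' := d.insert ns[i] (if i + 1 < ns.length then ns.getD (i + 1) "" else "") with hd'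
      have hstep2 : pvAFrom ns start (i + 1) d' = pvAFrom ns start (i + 2) d' := by
        by_cases h1 : i + 1 < ns.length
        · rw [pvAFrom_step ns start (i + 1) h1,
            pvF_skip ns start (i + 1) (Or.inr (by omega))]
        · rw [pvAFrom_stop ns start (i + 1) (by omega),
            pvAFrom_stop ns start (i + 2) (by omega)]
      rw [hstep2, ih (i + 2) d' (by omega) (by omega) (by push_cast; omega)]
      conv_rhs => rw [pvBLoop]
      rw [if_pos h]
      congr 1
      rw [hd']
      congr 1
      exact (List.getD_eq_getElem ns "" h).symm
    · rw [pvAFrom_stop ns start i (by omega), pvBLoop, if_neg h]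

-- every index below the adjusted start index is skipped by A's loop body
lemma pvPrefix_skip (start : Int) (i0 : Nat)
    (hi0 : (i0 : Int) = (if PySem.Int.mod (max start 0) 2 ≠ 0 then max start 0 + 1 else max start 0))
    (i : Nat) (hlt : i < i0) : (i : Int) < start ∨ i % 2 = 1 := by
  have hm : PySem.Int.mod (max start 0) 2 = (max start 0) % 2 :=
    PySem.Int.mod_eq_emod_of_pos (by omega)
  by_cases hp : (max start 0) % 2 = 0
  · rw [hm] at hi0; rw [if_neg (by omega)] at hi0; left; omega
  · rw [hm] at hi0; rw [if_pos (by omega)] at hi0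
    by_cases hge : (i : Int) ≥ start
    · right
      have : (i : Int) = max start 0 := by omega
      omega
    · left; omega

lemma pvAFrom_prefix (ns : List String) (start : Int) (i0 : Nat)
    (hi0 : (i0 : Int) = (if PySem.Int.mod (max start 0) 2 ≠ 0 then max start 0 + 1 else max start 0)) :
    ∀ (k : Nat) (d : PySem.Dict String String),
      pvAFrom ns start (i0 - k) d = pvAFrom ns start i0 d := by
  intro k
  induction k with
  | zero => intro d; rfl
  | succ k ih =>
    intro d
    by_cases hk : i0 ≤ k
    · have : i0 - (k + 1) = i0 - k := by omega
      rw [this, ih]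
    · have hlt : i0 - (k + 1) < i0 := by omega
      have hsucc : i0 - (k + 1) + 1 = i0 - k := by omega
      by_cases h : i0 - (k + 1) < ns.length
      · rw [pvAFrom_step ns start _ h,
          pvF_skip ns start _ (pvPrefix_skip start i0 hi0 _ hlt), hsucc, ih]
      · rw [pvAFrom_stop ns start _ (by omega), ← ih,
          pvAFrom_stop ns start _ (by omega)]

-- ===== VERDICT (by name: the statement is the Claim_ definition above) =====
theorem parse_path_as_dictionary_spec : Claim_equal_parse_path_as_dictionary := by
  intro path_info start _
  unfold Spec_parse_path_as_dictionary parse_path_as_dictionary parse_path_as_dictionary_alt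
  simp only [PySem.List.foldl_append_ite_eq_filter, List.nil_append]
  set ns := ((PySem.Str.split? path_info "/").getD []).filter (fun n => decide (n ≠ "")) with hns
  set e : Int := if PySem.Int.mod (max start 0) 2 ≠ 0 then max start 0 + 1 else max start 0 with he
  have hm : PySem.Int.mod (max start 0) 2 = (max start 0) % 2 :=
    PySem.Int.mod_eq_emod_of_pos (by omega)
  have hepos : 0 ≤ e := by rw [he, hm]; split <;> omega
  have hcast : ((e.toNat : Nat) : Int) = e := Int.toNat_of_nonneg hepos
  have heven : e.toNat % 2 = 0 := by
    rw [he, hm] at hcast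
    by_cases hp : (max start 0) % 2 = 0
    · rw [if_neg (by omega)] at hcast; omega
    · rw [if_pos (by omega)] at hcast; omega
  have hge : ((e.toNat : Nat) : Int) ≥ start := by rw [hcast, he]; split <;> omega
  have hchain : pvAFrom ns start 0 PySem.Dict.empty = pvBLoop ns e.toNat PySem.Dict.empty := by
    have h1 := pvAFrom_prefix ns start e.toNat (by rw [hcast]) e.toNat PySem.Dict.empty
    simp only [Nat.sub_self] at h1
    rw [h1, pvAFrom_eq_bLoop ns start ns.length e.toNat PySem.Dict.empty (by omega) heven hge]
  have h0 : pvAFrom ns start 0 PySem.Dict.empty =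
      (PySem.List.enumerate ns 0).foldl (pvF ns start) PySem.Dict.empty := by
    unfold pvAFrom; rw [List.drop_zero]; norm_num
  rw [← hchain, h0]
  rfl
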